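-- pv_equiv track=rewrite | github.com/shadowfowl/advent_of_code_2021 | Day3P2/Day3P2.py | less_common
-- ===== SOURCE A (Python) =====
-- def less_common(array, bit):
--     bc1 = []
--     bc0 = []
--     for y in range(len(array)):
--         line = array[y]
--         if line[bit] == '1':
--             bc1.append(line)
--         else:
--             bc0.append(line)
--     if len(bc1) < len(bc0):
--         array = bc1
--
--     else:
--         array = bc0
--     return array
-- ===== SOURCE B (Python) =====
-- def less_common(array, bit):
--     ones = sum(1 for line in array if line[bit] == '1')
--     if 2 * ones < len(array):
--         return [line for line in array if line[bit] == '1']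
--     return [line for line in array if line[bit] != '1']
-- ===== Notes on version B (the rewrite author's own statement) =====
-- stated objective: simpler
-- what changed: B replaces A's two parallel accumulator lists with a single counting pass (ones = count of '1'-bits) followed by one filtering comprehension selecting the less common group; no intermediate groups are materialised.
import Mathlib
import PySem

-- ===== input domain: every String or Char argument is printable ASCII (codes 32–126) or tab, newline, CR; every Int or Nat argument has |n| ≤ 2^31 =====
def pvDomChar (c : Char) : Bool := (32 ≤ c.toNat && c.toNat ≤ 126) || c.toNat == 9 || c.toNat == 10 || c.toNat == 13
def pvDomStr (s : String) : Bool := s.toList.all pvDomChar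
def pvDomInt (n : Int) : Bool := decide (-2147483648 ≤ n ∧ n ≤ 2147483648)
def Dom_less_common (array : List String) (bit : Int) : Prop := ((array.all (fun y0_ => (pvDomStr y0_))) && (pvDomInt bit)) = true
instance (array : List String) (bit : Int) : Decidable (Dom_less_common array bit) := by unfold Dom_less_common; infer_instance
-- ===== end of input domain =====

-- B replaces A's two parallel accumulator lists by one counting pass plus one filter (simpler decomposition; same O(n) cost).


-- ===== PORT A =====
-- foldl over range(len(array)) with pyGetD; the "" default is never used (indices come from the range).
def less_common (array : List String) (bit : Int) : List String :=
  let st := (PySem.List.pyRange 0 (array.length : Int) 1).foldl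
    (fun (st : List String × List String) y =>
      let line := PySem.List.pyGetD array y ""
      if PySem.Str.pyGet? line bit == some '1' then (st.1 ++ [line], st.2)
      else (st.1, st.2 ++ [line])) ([], [])
  if st.1.length < st.2.length then st.1 else st.2

-- ===== PORT B =====
def less_common_alt (array : List String) (bit : Int) : List String :=
  let ones : Int := (array.countP (fun line => PySem.Str.pyGet? line bit == some '1') : Int)
  if 2 * ones < (array.length : Int) then
    array.filter (fun line => PySem.Str.pyGet? line bit == some '1')
  else
    array.filter (fun line => !(PySem.Str.pyGet? line bit == some '1'))

-- ===== PRECONDITION & SPEC =====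
-- Pre_ excludes exactly the inputs where Python A raises IndexError: some line has no character at index bit.
def Pre_less_common (array : List String) (bit : Int) : Prop :=
  ∀ line ∈ array, PySem.Raise.InRange line.toList.length bit
instance (array : List String) (bit : Int) : Decidable (Pre_less_common array bit) := by unfold Pre_less_common; infer_instance
def pvWitness_less_common : List String × Int := (["10", "01", "11"], 0)

def Spec_less_common (array : List String) (bit : Int) (out : List String) : Prop := out = less_common_alt array bit
instance (array : List String) (bit : Int) (out : List String) : Decidable (Spec_less_common array bit out) := by unfold Spec_less_common; infer_instance

-- ===== CLAIM (what is proved, stated in full; the proofs are below) =====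
def Claim_equal_less_common : Prop := ∀ (array : List String) (bit : Int), Dom_less_common array bit → Pre_less_common array bit → Spec_less_common array bit (less_common array bit)

-- ===== LEMMAS AND PROOFS =====

-- A's loop state: the pair of accumulators is (filter p, filter ¬p) appended to the starting pair.
theorem pair_foldl_filter (p : String → Bool) (l : List String) (a b : List String) :
    l.foldl (fun (st : List String × List String) line =>
      if p line then (st.1 ++ [line], st.2) else (st.1, st.2 ++ [line])) (a, b)
    = (a ++ l.filter p, b ++ l.filter (fun x => !p x)) := by
  induction l generalizing a b with
  | nil => simp
  | cons x xs ih =>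
    by_cases h : p x <;> simp [h, ih]

-- ===== VERDICT (by name: the statement is the Claim_ definition above) =====
theorem less_common_spec : Claim_equal_less_common := by
  intro array bit _ _
  unfold Spec_less_common less_common less_common_alt
  rw [PySem.List.foldl_pyRange_zero_pyGetD' array ""
      (fun (st : List String × List String) line =>
        if PySem.Str.pyGet? line bit == some '1' then (st.1 ++ [line], st.2)
        else (st.1, st.2 ++ [line])) ([], []),
    pair_foldl_filter (fun line => PySem.Str.pyGet? line bit == some '1') array [] []]
  simp only [List.nil_append]
  have h1 : (array.filter (fun line => PySem.Str.pyGet? line bit == some '1')).length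
      = array.countP (fun line => PySem.Str.pyGet? line bit == some '1') := by
    simp [List.countP_eq_length_filter]
  have h2 : array.length
      = (array.filter (fun line => PySem.Str.pyGet? line bit == some '1')).length
      + (array.filter (fun x => !(PySem.Str.pyGet? x bit == some '1'))).length :=
    List.length_eq_length_filter_add (fun line => PySem.Str.pyGet? line bit == some '1')
  split_ifs with hA hB hB
  · rfl
  · exfalso; apply hB; omega
  · exfalso; apply hA; omega
  · rfl
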